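-- pv_equiv track=rewrite | github.com/kosciej/wsjtx-ft2libre | research/ft2_test_nsps288.py | is_costas
-- ===== SOURCE A (Python) =====
-- def is_costas(perm):
--     n = len(perm)
--     for d in range(1, n):
--         diffs = set()
--         for i in range(n - d):
--             diff = perm[i + d] - perm[i]
--             if diff in diffs:
--                 return False
--             diffs.add(diff)
--     return True
-- ===== SOURCE B (Python) =====
-- def is_costas(perm):
--     n = len(perm)
--     vecs = sorted((j - i, perm[j] - perm[i]) for i in range(n) for j in range(i + 1, n))
--     return all(vecs[k] != vecs[k + 1] for k in range(len(vecs) - 1))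
-- ===== Notes on version B (the rewrite author's own statement) =====
-- stated objective: alternative
-- what changed: B replaces A's per-shift hash sets with an early return by a single sweep over all index pairs i<j that collects every displacement vector (j-i, perm[j]-perm[i]), lexicographically sorts the list, and detects duplicates by one adjacent-pair scan.
import Mathlib
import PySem

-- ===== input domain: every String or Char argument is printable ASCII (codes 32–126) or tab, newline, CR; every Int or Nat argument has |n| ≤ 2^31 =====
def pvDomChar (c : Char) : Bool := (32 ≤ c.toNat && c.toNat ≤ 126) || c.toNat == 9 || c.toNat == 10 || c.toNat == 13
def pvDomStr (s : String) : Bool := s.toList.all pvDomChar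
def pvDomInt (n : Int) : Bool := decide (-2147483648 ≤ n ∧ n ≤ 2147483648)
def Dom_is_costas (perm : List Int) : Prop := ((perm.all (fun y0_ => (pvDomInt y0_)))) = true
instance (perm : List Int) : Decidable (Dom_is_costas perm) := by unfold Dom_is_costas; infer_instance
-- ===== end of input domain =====

-- B enumerates all index pairs i<j once, sorts the displacement vectors (j-i, perm[j]-perm[i])
-- lexicographically and scans adjacent entries for a duplicate — no per-shift sets, no early return.


-- ===== PORT A =====
-- inner loop 'for i in range(n-d)' with the early 'return False';
-- indices i and i+d are always in range here, so pyGetD _ _ 0 is exact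
def isCostasRow (perm : List Int) (d : Int) : List Int → PySem.Set Int → Bool
  | [], _ => true
  | i :: rest, diffs =>
    let diff := PySem.List.pyGetD perm (i + d) 0 - PySem.List.pyGetD perm i 0
    if PySem.Set.contains diffs diff then false
    else isCostasRow perm d rest (PySem.Set.add diffs diff)

-- outer loop 'for d in range(1, n)'
def isCostasOuter (perm : List Int) : List Int → Bool
  | [] => true
  | d :: rest =>
    if isCostasRow perm d (PySem.List.pyRange 0 ((perm.length : Int) - d)) PySem.Set.empty
    then isCostasOuter perm rest else false

def is_costas (perm : List Int) : Bool :=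
  isCostasOuter perm (PySem.List.pyRange 1 (perm.length : Int))

-- ===== PORT B =====
def is_costas_alt (perm : List Int) : Bool :=
  let n : Int := perm.length
  let vecs :=
    PySem.List.sorted2
      ((PySem.List.pyRange 0 n).flatMap (fun i =>
        (PySem.List.pyRange (i + 1) n).map (fun j =>
          (j - i, PySem.List.pyGetD perm j 0 - PySem.List.pyGetD perm i 0))))
      Prod.fst Prod.snd
  (PySem.List.pyRange 0 ((vecs.length : Int) - 1)).all (fun k =>
    !(PySem.List.pyGetD vecs k ((0 : Int), (0 : Int)) == PySem.List.pyGetD vecs (k + 1) ((0 : Int), (0 : Int))))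

-- ===== PRECONDITION & SPEC =====
def Spec_is_costas (perm : List Int) (out : Bool) : Prop := out = is_costas_alt perm
instance (perm : List Int) (out : Bool) : Decidable (Spec_is_costas perm out) := by unfold Spec_is_costas; infer_instance

-- ===== CLAIM (what is proved, stated in full; the proofs are below) =====
def Claim_equal_is_costas : Prop := ∀ (perm : List Int), Dom_is_costas perm → Spec_is_costas perm (is_costas perm)

-- ===== LEMMAS AND PROOFS =====

-- the diff value at index i for shift d
def diffAt (perm : List Int) (d i : Int) : Int :=
  PySem.List.pyGetD perm (i + d) 0 - PySem.List.pyGetD perm i 0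

def rowList (perm : List Int) (d : Int) : List Int :=
  (PySem.List.pyRange 0 ((perm.length : Int) - d)).map (diffAt perm d)

lemma row_eq (perm : List Int) (d : Int) :
    ∀ (is : List Int) (diffs : PySem.Set Int),
      isCostasRow perm d is diffs = true ↔
        (is.map (diffAt perm d)).Nodup ∧ ∀ i ∈ is, diffAt perm d i ∉ diffs := by
  intro is
  induction is with
  | nil => intro diffs; simp [isCostasRow]
  | cons i rest ih =>
    intro diffs
    show (if PySem.Set.contains diffs (diffAt perm d i) then false
          else isCostasRow perm d rest (PySem.Set.add diffs (diffAt perm d i))) = true ↔ _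
    by_cases h : diffAt perm d i ∈ diffs
    · rw [if_pos ((PySem.Set.contains_iff diffs _).mpr h)]
      simp only [Bool.false_eq_true, false_iff]
      rintro ⟨_, hall⟩
      exact hall i (by simp) h
    · rw [if_neg (by simpa using h)]
      rw [ih]
      simp only [List.map_cons, List.nodup_cons, List.mem_cons]
      constructor
      · rintro ⟨hn, hall⟩
        have hnotmap : diffAt perm d i ∉ rest.map (diffAt perm d) := by
          intro hm
          rcases List.mem_map.mp hm with ⟨j, hj, hje⟩
          have hmem := hall j hj
          rw [PySem.Set.mem_add] at hmem
          push_neg at hmem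
          exact hmem.2 hje
        refine ⟨⟨hnotmap, hn⟩, ?_⟩
        rintro j (rfl | hj)
        · exact h
        · have hmem := hall j hj
          rw [PySem.Set.mem_add] at hmem
          push_neg at hmem
          exact hmem.1
      · rintro ⟨⟨hni, hn⟩, hall⟩
        refine ⟨hn, fun j hj => ?_⟩
        rw [PySem.Set.mem_add]
        push_neg
        refine ⟨hall j (Or.inr hj), fun he => hni ?_⟩
        exact List.mem_map.mpr ⟨j, hj, he⟩

lemma outer_eq (perm : List Int) :
    ∀ (ds : List Int),
      isCostasOuter perm ds = true ↔ ∀ d ∈ ds, (rowList perm d).Nodup := by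
  intro ds
  induction ds with
  | nil => simp [isCostasOuter]
  | cons d rest ih =>
    show (if isCostasRow perm d (PySem.List.pyRange 0 ((perm.length : Int) - d)) PySem.Set.empty
          then isCostasOuter perm rest else false) = true ↔ _
    by_cases h : isCostasRow perm d (PySem.List.pyRange 0 ((perm.length : Int) - d)) PySem.Set.empty = true
    · rw [if_pos h, ih]
      have hrow : (rowList perm d).Nodup := ((row_eq perm d _ _).mp h).1
      constructor
      · intro hall j hj
        rcases List.mem_cons.mp hj with rfl | hj
        · exact hrow
        · exact hall j hj
      · intro hall j hj
        exact hall j (List.mem_cons_of_mem _ hj)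
    · rw [if_neg h]
      simp only [Bool.false_eq_true, false_iff]
      intro hall
      apply h
      apply (row_eq perm d _ _).mpr
      refine ⟨hall d (by simp), fun i _ => ?_⟩
      simp [PySem.Set.empty]

-- the list of index pairs i < j that B's comprehension runs over
def pairList (n : Int) : List (Int × Int) :=
  (PySem.List.pyRange 0 n).flatMap (fun i => (PySem.List.pyRange (i + 1) n).map (fun j => (i, j)))

-- the displacement vector of one index pair
def vecOf (perm : List Int) (q : Int × Int) : Int × Int :=
  (q.2 - q.1, PySem.List.pyGetD perm q.2 0 - PySem.List.pyGetD perm q.1 0)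

lemma mem_pairList (n : Int) (i j : Int) :
    (i, j) ∈ pairList n ↔ 0 ≤ i ∧ i < j ∧ j < n := by
  unfold pairList
  simp only [List.mem_flatMap, List.mem_map, PySem.List.mem_pyRange_one, Prod.mk.injEq]
  constructor
  · rintro ⟨i', ⟨hi0, _⟩, j', ⟨hj1, hj2⟩, rfl, rfl⟩
    omega
  · rintro ⟨h0, h1, h2⟩
    exact ⟨i, ⟨h0, by omega⟩, j, ⟨by omega, h2⟩, rfl, rfl⟩

lemma nodup_pairList (n : Int) : (pairList n).Nodup := by
  unfold pairList
  rw [List.nodup_flatMap]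
  constructor
  · intro i _
    exact (PySem.List.nodup_pyRange_one _ _).map (fun a b h => by simpa using h)
  · apply List.Pairwise.imp ?_ ((PySem.List.nodup_pyRange_one 0 n))
    intro a b hne x hxa hxb
    simp only [List.mem_map] at hxa hxb
    rcases hxa with ⟨j, _, rfl⟩
    rcases hxb with ⟨j', _, h⟩
    exact hne (by simpa using congrArg Prod.fst h.symm)

-- B's raw vector list is the vector map over the pair list
lemma rawList_eq (perm : List Int) :
    (PySem.List.pyRange 0 (perm.length : Int)).flatMap (fun i =>
        (PySem.List.pyRange (i + 1) (perm.length : Int)).map (fun j =>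
          (j - i, PySem.List.pyGetD perm j 0 - PySem.List.pyGetD perm i 0)))
      = (pairList (perm.length : Int)).map (vecOf perm) := by
  simp [pairList, vecOf, List.map_flatMap, List.map_map, Function.comp_def]

lemma vecOf_shift (perm : List Int) (d i : Int) :
    vecOf perm (i, i + d) = (d, diffAt perm d i) := by
  simp [vecOf, diffAt]

-- global uniqueness of the vectors = per-shift uniqueness of the differences
lemma nodup_map_vec_iff (perm : List Int) :
    ((pairList (perm.length : Int)).map (vecOf perm)).Nodup ↔
      ∀ d ∈ PySem.List.pyRange 1 (perm.length : Int), (rowList perm d).Nodup := by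
  rw [List.nodup_map_iff_inj_on (nodup_pairList _)]
  constructor
  · intro hinj d hd
    rw [PySem.List.mem_pyRange_one] at hd
    rw [rowList, List.nodup_map_iff_inj_on (PySem.List.nodup_pyRange_one _ _)]
    intro i hi i' hi' he
    rw [PySem.List.mem_pyRange_one] at hi hi'
    have h1 : (i, i + d) ∈ pairList (perm.length : Int) := (mem_pairList _ _ _).mpr (by omega)
    have h2 : (i', i' + d) ∈ pairList (perm.length : Int) := (mem_pairList _ _ _).mpr (by omega)
    have := hinj _ h1 _ h2 (by rw [vecOf_shift, vecOf_shift, he])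
    simpa using congrArg Prod.fst this
  · intro hrows q hq r hr he
    obtain ⟨i, j⟩ := q
    obtain ⟨i', j'⟩ := r
    rw [mem_pairList] at hq hr
    have hd : j - i = j' - i' := by simpa [vecOf] using congrArg Prod.fst he
    set d := j - i with hdd
    have hj : j = i + d := by omega
    have hj' : j' = i' + d := by omega
    have hdm : d ∈ PySem.List.pyRange 1 (perm.length : Int) :=
      (PySem.List.mem_pyRange_one).mpr (by omega)
    have hrow := hrows d hdm
    rw [rowList, List.nodup_map_iff_inj_on (PySem.List.nodup_pyRange_one _ _)] at hrow
    have hii : i = i' := by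
      apply hrow i ((PySem.List.mem_pyRange_one).mpr (by omega))
        i' ((PySem.List.mem_pyRange_one).mpr (by omega))
      have := congrArg Prod.snd he
      rw [hj, hj', vecOf_shift, vecOf_shift] at this
      simpa using this
    simp [hii, hj, hj']

-- Python's lexicographic '<' on int pairs, as sorted2 compares
def ltp (a b : Int × Int) : Bool :=
  decide (a.1 < b.1) || (!decide (b.1 < a.1) && decide (a.2 < b.2))

lemma ltp_asym (a b : Int × Int) (h : ltp a b = true) : ltp b a = false := by
  simp [ltp] at *; omega

lemma ltp_compat (a b c : Int × Int) (h1 : ltp a b = true) (h2 : ltp c b = false) :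
    ltp c a = false := by
  simp [ltp] at *; omega

lemma ltp_antisym (a b : Int × Int) (h1 : ltp a b = false) (h2 : ltp b a = false) : a = b := by
  obtain ⟨a1, a2⟩ := a; obtain ⟨b1, b2⟩ := b
  simp [ltp] at *; omega

lemma pairwise_insertBy (x : Int × Int) :
    ∀ ys : List (Int × Int), ys.Pairwise (fun u v => ltp v u = false) →
      (PySem.List.insertBy ltp x ys).Pairwise (fun u v => ltp v u = false) := by
  intro ys
  induction ys with
  | nil => intro _; simp [PySem.List.insertBy]
  | cons y ys ih =>
    intro hp
    rcases List.pairwise_cons.mp hp with ⟨hy, hys⟩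
    show (if ltp x y = true then x :: y :: ys else y :: PySem.List.insertBy ltp x ys).Pairwise _
    by_cases h : ltp x y = true
    · rw [if_pos h]
      refine List.pairwise_cons.mpr ⟨?_, hp⟩
      intro z hz
      rcases List.mem_cons.mp hz with rfl | hz
      · exact ltp_asym _ _ h
      · exact ltp_compat _ _ _ h (hy z hz)
    · rw [if_neg h]
      refine List.pairwise_cons.mpr ⟨?_, ih hys⟩
      intro z hz
      rcases (PySem.List.mem_insertBy ltp x z ys).mp hz with rfl | hz
      · exact Bool.eq_false_iff.mpr h
      · exact hy z hz

-- sorted2 with these keys IS insertion sort by ltp (definitional)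
lemma sorted2_eq_foldl (xs : List (Int × Int)) :
    PySem.List.sorted2 xs Prod.fst Prod.snd =
      xs.foldl (fun acc x => PySem.List.insertBy ltp x acc) [] := rfl

lemma sorted2_pairwise (xs : List (Int × Int)) :
    (PySem.List.sorted2 xs Prod.fst Prod.snd).Pairwise (fun u v => ltp v u = false) := by
  rw [sorted2_eq_foldl]
  suffices h : ∀ acc : List (Int × Int), acc.Pairwise (fun u v => ltp v u = false) →
      (xs.foldl (fun acc x => PySem.List.insertBy ltp x acc) acc).Pairwise
        (fun u v => ltp v u = false) from h [] (by simp)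
  induction xs with
  | nil => intro acc h; simpa using h
  | cons x xs ih =>
    intro acc h
    exact ih _ (pairwise_insertBy x acc h)

lemma nodup_of_pairwise_adj {α : Type} (R : α → α → Prop)
    (hanti : ∀ a b, R a b → R b a → a = b) :
    ∀ l : List α, l.Pairwise R → l.IsChain (· ≠ ·) → l.Nodup := by
  intro l
  induction l with
  | nil => intro _ _; simp
  | cons a t ih =>
    intro hp hc
    rcases List.pairwise_cons.mp hp with ⟨ha, hpt⟩
    cases t with
    | nil => simp
    | cons b t' =>
      have hab : a ≠ b := (List.isChain_cons_cons.mp hc).1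
      have hct : (b :: t').IsChain (· ≠ ·) := (List.isChain_cons_cons.mp hc).2
      refine List.nodup_cons.mpr ⟨?_, ih hpt hct⟩
      intro hmem
      rcases List.mem_cons.mp hmem with rfl | hmem
      · exact hab rfl
      · rcases List.pairwise_cons.mp hpt with ⟨hb, _⟩
        exact hab (hanti a b (ha b (by simp)) (hb a hmem))

-- the adjacent scan over the sorted list decides Nodup
-- the adjacent scan over any list, as B writes it, decides IsChain Ne
lemma adj_scan_iff (vecs : List (Int × Int)) :
    ((PySem.List.pyRange 0 ((vecs.length : Int) - 1)).all (fun k =>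
      !(PySem.List.pyGetD vecs k ((0 : Int), (0 : Int)) ==
        PySem.List.pyGetD vecs (k + 1) ((0 : Int), (0 : Int)))) = true)
      ↔ vecs.IsChain (· ≠ ·) := by
  rw [List.all_eq_true, List.isChain_iff_getElem]
  constructor
  · intro h i hi
    have hk : (i : Int) ∈ PySem.List.pyRange 0 ((vecs.length : Int) - 1) :=
      PySem.List.mem_pyRange_one.mpr ⟨Int.natCast_nonneg i, by omega⟩
    have := h _ hk
    rw [PySem.List.pyGetD_eq_getElem vecs _ (Int.natCast_nonneg i) (by omega),
        PySem.List.pyGetD_eq_getElem vecs _ (by positivity) (by omega)] at this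
    simp only [Bool.not_eq_eq_eq_not, Bool.not_true, beq_eq_false_iff_ne, ne_eq] at this
    have h1 : ((i : Int)).toNat = i := Int.toNat_natCast i
    have h2 : ((i : Int) + 1).toNat = i + 1 := by omega
    simpa only [h1, h2] using this
  · intro h k hk
    rcases PySem.List.mem_pyRange_one.mp hk with ⟨hk0, hk1⟩
    rw [PySem.List.pyGetD_eq_getElem vecs _ hk0 (by omega),
        PySem.List.pyGetD_eq_getElem vecs _ (by omega) (by omega)]
    simp only [Bool.not_eq_eq_eq_not, Bool.not_true, beq_eq_false_iff_ne, ne_eq]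
    have h2 : (k + 1).toNat = k.toNat + 1 := by omega
    simpa only [h2] using h k.toNat (by omega)

lemma alt_eq_nodup (perm : List Int) :
    is_costas_alt perm = true ↔
      ((pairList (perm.length : Int)).map (vecOf perm)).Nodup := by
  unfold is_costas_alt
  simp only [rawList_eq]
  rw [adj_scan_iff]
  constructor
  · intro h
    exact ((PySem.List.sorted2_perm _ _ _ _).nodup_iff).mp
      (nodup_of_pairwise_adj (fun u v => ltp v u = false)
        (fun a b h1 h2 => ltp_antisym a b h2 h1) _ (sorted2_pairwise _) h)
  · intro h
    exact List.Pairwise.isChain (((PySem.List.sorted2_perm _ _ _ _).nodup_iff).mpr h)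

theorem is_costas_eq (perm : List Int) : is_costas perm = is_costas_alt perm := by
  have hA : is_costas perm = true ↔
      ∀ d ∈ PySem.List.pyRange 1 (perm.length : Int), (rowList perm d).Nodup :=
    outer_eq perm _
  have hB := (alt_eq_nodup perm).trans (nodup_map_vec_iff perm)
  cases hva : is_costas perm with
  | true => exact ((hB.mpr (hA.mp hva)).symm)
  | false =>
    cases hvb : is_costas_alt perm with
    | true => exact absurd (hA.mpr (hB.mp hvb)) (by simp [hva])
    | false => rfl

-- ===== VERDICT (by name: the statement is the Claim_ definition above) =====
theorem is_costas_spec : Claim_equal_is_costas := by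
  intro perm _
  unfold Spec_is_costas
  exact is_costas_eq perm
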